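-- pv_equiv track=rewrite | github.com/azrihasin/crs-scheduler-server | app.py | getAllIndex
-- ===== SOURCE A (Python) =====
-- def getAllIndex(seperatedList):
--
--     formatIndex = 0
--     dayIndex = 0
--     statusIndex = 0
--
--     for i, sWord in enumerate(seperatedList):
--
--         # Get format
--
--         if sWord == "AM" or sWord == "AM\n":
--
--             formatIndex = i
--
--         elif sWord == "PM" or sWord == "PM\n":
--
--             formatIndex = i
--
--         # Get day
--
--         if sWord == "MON":
--
--             dayIndex = i
--
--         elif sWord == "M-W":
--
--             dayIndex = i
--
--         elif sWord == "TUE":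
--
--             dayIndex = i
--
--         elif sWord == "THU":
--
--             dayIndex = i
--
--         elif sWord == "T-TH":
--
--             dayIndex = i
--
--         elif sWord == "WED":
--
--             dayIndex = i
--
--         elif sWord == "FRI":
--
--             dayIndex = i
--
--         # Get status
--
--         if(sWord == "R" or sWord == "RSV" or sWord == "R_"):
--
--             statusIndex = i
--
--     return formatIndex, dayIndex, statusIndex
-- ===== SOURCE B (Python) =====
-- FORMAT_WORDS = {"AM", "AM\n", "PM", "PM\n"}
-- DAY_WORDS = {"MON", "M-W", "TUE", "THU", "T-TH", "WED", "FRI"}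
-- STATUS_WORDS = {"R", "RSV", "R_"}
--
--
-- def getAllIndex(seperatedList):
--     formatIndex = 0
--     dayIndex = 0
--     statusIndex = 0
--     foundFormat = foundDay = foundStatus = False
--     for i in range(len(seperatedList) - 1, -1, -1):
--         w = seperatedList[i]
--         if not foundFormat and w in FORMAT_WORDS:
--             formatIndex = i
--             foundFormat = True
--         if not foundDay and w in DAY_WORDS:
--             dayIndex = i
--             foundDay = True
--         if not foundStatus and w in STATUS_WORDS:
--             statusIndex = i
--             foundStatus = True
--         if foundFormat and foundDay and foundStatus:
--             break
--     return formatIndex, dayIndex, statusIndex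
-- ===== Notes on version B (the rewrite author's own statement) =====
-- stated objective: alternative
-- what changed: B scans the list backwards keeping first-hit-wins flags per category and breaks out as soon as all three keyword categories have been located, instead of A's full forward pass that overwrites each index on every match.
import Mathlib
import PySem

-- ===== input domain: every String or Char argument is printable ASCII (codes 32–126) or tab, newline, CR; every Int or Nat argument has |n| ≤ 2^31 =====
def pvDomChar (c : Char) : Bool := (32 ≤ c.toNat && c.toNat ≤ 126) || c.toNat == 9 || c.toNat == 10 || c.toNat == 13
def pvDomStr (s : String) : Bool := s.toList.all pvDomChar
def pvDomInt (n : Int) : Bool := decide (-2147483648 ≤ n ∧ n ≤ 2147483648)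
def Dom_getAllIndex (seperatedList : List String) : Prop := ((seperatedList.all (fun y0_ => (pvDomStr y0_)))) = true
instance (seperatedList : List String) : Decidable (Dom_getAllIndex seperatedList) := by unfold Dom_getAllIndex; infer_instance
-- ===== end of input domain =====

-- B scans the list backwards with first-hit-wins flags per category and stops once all
-- three are found, instead of A's full forward pass overwriting each index on every match
-- (objective: alternative; same result).

-- ===== PORT A =====
-- one loop body step of A: the ordered if/elif chains, verbatim
def pvStepA (st : Int × Int × Int) (p : Int × String) : Int × Int × Int :=
  let f := st.1; let d := st.2.1; let s := st.2.2
  let i := p.1; let w := p.2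
  let f := if w == "AM" || w == "AM\n" then i
           else if w == "PM" || w == "PM\n" then i
           else f
  let d := if w == "MON" then i
           else if w == "M-W" then i
           else if w == "TUE" then i
           else if w == "THU" then i
           else if w == "T-TH" then i
           else if w == "WED" then i
           else if w == "FRI" then i
           else d
  let s := if w == "R" || w == "RSV" || w == "R_" then i else s
  (f, d, s)

def getAllIndex (seperatedList : List String) : Int × Int × Int :=
  (PySem.List.enumerate seperatedList).foldl pvStepA (0, 0, 0)

-- ===== PORT B =====
-- B's keyword-set membership tests
def pvIsFormat (w : String) : Bool := w == "AM" || w == "AM\n" || w == "PM" || w == "PM\n"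
def pvIsDay (w : String) : Bool :=
  w == "MON" || w == "M-W" || w == "TUE" || w == "THU" || w == "T-TH" || w == "WED" || w == "FRI"
def pvIsStatus (w : String) : Bool := w == "R" || w == "RSV" || w == "R_"

-- B's backward loop: indices descending with their words ((i, seperatedList[i]) pairs,
-- i from len-1 down to 0), with the early break once all three flags are set
def pvGoB : List (Int × String) → Int × Bool → Int × Bool → Int × Bool → Int × Int × Int
  | [], fp, dp, sp => (fp.1, dp.1, sp.1)
  | (i, w) :: rest, fp, dp, sp =>
    let fp := if !fp.2 && pvIsFormat w then (i, true) else fp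
    let dp := if !dp.2 && pvIsDay w then (i, true) else dp
    let sp := if !sp.2 && pvIsStatus w then (i, true) else sp
    if fp.2 && dp.2 && sp.2 then (fp.1, dp.1, sp.1) else pvGoB rest fp dp sp

def getAllIndex_alt (seperatedList : List String) : Int × Int × Int :=
  pvGoB (PySem.List.enumerate seperatedList).reverse (0, false) (0, false) (0, false)

-- ===== PRECONDITION & SPEC =====
def Spec_getAllIndex (seperatedList : List String) (out : Int × Int × Int) : Prop := out = getAllIndex_alt seperatedList
instance (seperatedList : List String) (out : Int × Int × Int) : Decidable (Spec_getAllIndex seperatedList out) := by unfold Spec_getAllIndex; infer_instance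

-- ===== CLAIM (what is proved, stated in full; the proofs are below) =====
def Claim_equal_getAllIndex : Prop := ∀ (seperatedList : List String), Dom_getAllIndex seperatedList → Spec_getAllIndex seperatedList (getAllIndex seperatedList)

-- ===== LEMMAS AND PROOFS =====

-- value of one category: the recorded value if its flag is set, else the first find in the
-- remaining (reversed) list, else the initial value
def pvPick (flag : Bool) (v : Int) (o : Option (Int × String)) : Int :=
  if flag then v else (o.map Prod.fst).getD v

theorem pvGoB_spec : ∀ (rl : List (Int × String)) (f : Int) (fF : Bool) (d : Int) (fD : Bool) (s : Int) (fS : Bool),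
    pvGoB rl (f, fF) (d, fD) (s, fS) =
      (pvPick fF f (rl.find? (fun p => pvIsFormat p.2)),
       pvPick fD d (rl.find? (fun p => pvIsDay p.2)),
       pvPick fS s (rl.find? (fun p => pvIsStatus p.2))) := by
  intro rl
  induction rl with
  | nil => intro f fF d fD s fS; simp [pvGoB, pvPick]
  | cons hd tl ih =>
    obtain ⟨i, w⟩ := hd
    intro f fF d fD s fS
    by_cases hF : pvIsFormat w <;> by_cases hD : pvIsDay w <;> by_cases hS : pvIsStatus w <;>
      cases fF <;> cases fD <;> cases fS <;>
      simp [pvGoB, pvPick, List.find?, hF, hD, hS, ih]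

-- A's per-component fold ("last match wins") equals the first find in the reversed list
theorem pvFoldl_last (p : String → Bool) : ∀ (l : List (Int × String)) (init : Int),
    l.foldl (fun a q => if p q.2 then q.1 else a) init =
      ((l.reverse.find? (fun q => p q.2)).map Prod.fst).getD init := by
  intro l
  induction l with
  | nil => intro init; simp
  | cons hd tl ih =>
    intro init
    have happ := List.find?_append (xs := tl.reverse) (ys := [hd]) (p := fun (q : Int × String) => p q.2)
    cases hfind : tl.reverse.find? (fun q => p q.2) with
    | some v => simp [List.foldl_cons, ih, happ, hfind]
    | none =>
      by_cases hp : p hd.2 <;> simp [List.foldl_cons, ih, happ, hfind, List.find?, hp]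

-- A's three-component fold splits into three independent per-category folds
theorem pvFoldA_split : ∀ (l : List (Int × String)) (f d s : Int),
    l.foldl pvStepA (f, d, s) =
      (l.foldl (fun a q => if pvIsFormat q.2 then q.1 else a) f,
       l.foldl (fun a q => if pvIsDay q.2 then q.1 else a) d,
       l.foldl (fun a q => if pvIsStatus q.2 then q.1 else a) s) := by
  intro l
  induction l with
  | nil => intro f d s; simp
  | cons hd tl ih =>
    obtain ⟨i, w⟩ := hd
    intro f d s
    have hstep : pvStepA (f, d, s) (i, w) =
        (if pvIsFormat w then i else f, if pvIsDay w then i else d, if pvIsStatus w then i else s) := by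
      simp only [pvStepA, pvIsFormat, pvIsDay, pvIsStatus]
      split_ifs <;> simp_all
    simp [List.foldl_cons, hstep, ih]

-- ===== VERDICT (by name: the statement is the Claim_ definition above) =====
theorem getAllIndex_spec : Claim_equal_getAllIndex := by
  intro l _
  unfold Spec_getAllIndex getAllIndex getAllIndex_alt
  rw [pvFoldA_split, pvFoldl_last, pvFoldl_last, pvFoldl_last, pvGoB_spec]
  simp [pvPick]
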